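-- pv_equiv track=rewrite | github.com/ab14jain/GrowTogether | Assignment Code/CountSubarrayZeroSum.py | solve
-- ===== SOURCE A (Python) =====
-- def solve(A):
--     n = len(A)
--     if n == 0:
--         return 0
--
--     sum_dict = {}
--     prefix_sum = [0] * n
--
--     count = 0
--     for i in range(n):
--         if i == 0:
--             prefix_sum[i] = A[i]
--         else:
--             prefix_sum[i] = prefix_sum[i-1] + A[i]
--
--
--     for i in range(n):
--         if prefix_sum[i] == 0:
--             count += 1
--         if prefix_sum[i] in sum_dict:
--             count += sum_dict[prefix_sum[i]]
--         sum_dict[prefix_sum[i]] = sum_dict.get(prefix_sum[i], 0) + 1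
--
--
--     return count % 1000000007
-- ===== SOURCE B (Python) =====
-- def solve(A):
--     count = 0
--     for i in range(len(A)):
--         s = 0
--         for x in A[i:]:
--             s += x
--             if s == 0:
--                 count += 1
--     return count % 1000000007
-- ===== Notes on version B (the rewrite author's own statement) =====
-- stated objective: simpler
-- what changed: Replaced the prefix-sum array plus hash-map occurrence counting with a plain double loop that enumerates each start index and keeps a running sum, counting whenever it hits zero; no auxiliary array or dictionary is built.
import Mathlib
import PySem

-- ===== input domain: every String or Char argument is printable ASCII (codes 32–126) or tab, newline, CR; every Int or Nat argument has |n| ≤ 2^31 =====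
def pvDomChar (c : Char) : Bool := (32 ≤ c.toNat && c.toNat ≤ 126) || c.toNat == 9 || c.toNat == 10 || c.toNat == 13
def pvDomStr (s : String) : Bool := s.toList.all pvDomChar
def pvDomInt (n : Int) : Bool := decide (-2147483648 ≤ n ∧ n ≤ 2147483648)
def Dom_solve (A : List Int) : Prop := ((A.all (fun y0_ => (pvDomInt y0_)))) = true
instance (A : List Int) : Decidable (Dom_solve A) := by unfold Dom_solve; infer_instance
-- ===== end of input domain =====

-- B replaces A's prefix-sum array + hash-map occurrence counting with a plain
-- double loop (running sum from each start index); simpler, same return value.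

-- ===== PORT A =====
-- building prefix_sum[i]; every index access is in range, so getD transcribes A[i] exactly
def solveBuildStep (A : List Int) (ps : List Int) (i : Nat) : List Int :=
  if i = 0 then ps.set i (A.getD i 0)
  else ps.set i (ps.getD (i - 1) 0 + A.getD i 0)

-- one iteration of A's counting loop over the state (sum_dict, count)
def solveStep (ps : List Int) (st : PySem.Dict Int Int × Int) (i : Nat) : PySem.Dict Int Int × Int :=
  let p := ps.getD i 0
  let c := if p = 0 then st.2 + 1 else st.2
  let c := match st.1.get? p with
           | some v => c + v
           | none => c
  (st.1.insert p (st.1.getD p 0 + 1), c)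

def solve (A : List Int) : Int :=
  let n := A.length
  if n = 0 then 0
  else
    let ps := (List.range n).foldl (solveBuildStep A) (List.replicate n 0)
    let st := (List.range n).foldl (solveStep ps) (PySem.Dict.empty, 0)
    PySem.Int.mod st.2 1000000007

-- ===== PORT B =====
-- inner loop state (s, count): s += x; if s == 0: count += 1
def solveAltStep (sc : Int × Int) (x : Int) : Int × Int :=
  let s := sc.1 + x
  (s, if s = 0 then sc.2 + 1 else sc.2)

def solve_alt (A : List Int) : Int :=
  let count := (List.range A.length).foldl
    (fun (c : Int) (i : Nat) => ((PySem.List.slice A (some (i : Int)) none).foldl solveAltStep (0, c)).2) 0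
  PySem.Int.mod count 1000000007

-- ===== PRECONDITION & SPEC =====
def Spec_solve (A : List Int) (out : Int) : Prop := out = solve_alt A
instance (A : List Int) (out : Int) : Decidable (Spec_solve A out) := by unfold Spec_solve; infer_instance

-- ===== CLAIM (what is proved, stated in full; the proofs are below) =====
def Claim_equal_solve : Prop := ∀ (A : List Int), Dom_solve A → Spec_solve A (solve A)

-- ===== LEMMAS AND PROOFS =====

-- prefix sum of the first k elements
def pvP (A : List Int) (k : Nat) : Int := (A.take k).sum

def pvInd (p : Prop) [Decidable p] : Int := if p then 1 else 0

-- the common quantity: number of pairs i ≤ j < n with zero segment sum, grouped by end j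
def pvN (A : List Int) : Int :=
  ∑ j ∈ Finset.range A.length, ∑ i ∈ Finset.range (j + 1),
    pvInd (pvP A (j + 1) - pvP A i = 0)

-- A's counting step abstracted over the prefix-value function q
def pvStep (q : Nat → Int) (st : PySem.Dict Int Int × Int) (i : Nat) : PySem.Dict Int Int × Int :=
  let p := q i
  let c := if p = 0 then st.2 + 1 else st.2
  let c := match st.1.get? p with
           | some v => c + v
           | none => c
  (st.1.insert p (st.1.getD p 0 + 1), c)

-- A's prefix_sum array read as a function
def pvQ (A : List Int) : Nat → Int :=
  fun i => ((List.range A.length).foldl (solveBuildStep A) (List.replicate A.length 0)).getD i 0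

lemma solveStep_eq_pvQ (A : List Int) :
    solveStep ((List.range A.length).foldl (solveBuildStep A) (List.replicate A.length 0))
      = pvStep (pvQ A) := rfl

lemma pvInd_congr {p q : Prop} [Decidable p] [Decidable q] (h : p ↔ q) : pvInd p = pvInd q := by
  unfold pvInd; simp [h]

lemma pv_take_succ_sum (A : List Int) (j : Nat) (hj : j < A.length) :
    (A.take (j + 1)).sum = (A.take j).sum + A.getD j 0 := by
  rw [List.take_add_one, List.sum_append]
  simp [List.getD, List.getElem?_eq_getElem hj]

lemma pv_getD_set (l : List Int) (i j : Nat) (v : Int) (hi : i < l.length) :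
    (l.set i v).getD j 0 = if j = i then v else l.getD j 0 := by
  simp only [List.getD, List.getElem?_set]
  by_cases h : i = j
  · subst h; simp [hi]
  · have h2 : ¬ j = i := fun h' => h h'.symm
    simp [h, h2]

lemma pv_build_inv (A : List Int) (m : Nat) (hm : m ≤ A.length) :
    ((List.range m).foldl (solveBuildStep A) (List.replicate A.length 0)).length = A.length ∧
    ∀ j < m, ((List.range m).foldl (solveBuildStep A) (List.replicate A.length 0)).getD j 0
        = pvP A (j + 1) := by
  induction m with
  | zero => simp
  | succ m ih =>
    obtain ⟨ihlen, ihval⟩ := ih (by omega)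
    rw [List.range_succ, List.foldl_append, List.foldl_cons, List.foldl_nil]
    set ps := (List.range m).foldl (solveBuildStep A) (List.replicate A.length 0) with hps
    have hm' : m < A.length := by omega
    have hlen : (solveBuildStep A ps m).length = A.length := by
      unfold solveBuildStep; split <;> simp [ihlen]
    refine ⟨hlen, ?_⟩
    intro j hj
    rcases Nat.lt_succ_iff_lt_or_eq.mp hj with hjm | hjm
    · have hne : j ≠ m := by omega
      unfold solveBuildStep
      split <;> rw [pv_getD_set ps m _ _ (by omega), if_neg hne] <;> exact ihval j hjm
    · subst hjm
      unfold solveBuildStep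
      split
      · next h0 =>
        subst h0
        rw [pv_getD_set ps 0 0 _ (by omega), if_pos rfl]
        unfold pvP
        rw [pv_take_succ_sum A 0 (by omega)]
        simp
      · next h0 =>
        rw [pv_getD_set ps j _ _ (by omega), if_pos rfl]
        rw [ihval (j - 1) (by omega)]
        have hmm : j - 1 + 1 = j := by omega
        rw [hmm]
        unfold pvP
        rw [pv_take_succ_sum A j hm']

lemma pv_countP_range (j : Nat) (p : Nat → Prop) [DecidablePred p] :
    (((List.range j).countP (fun i => decide (p i)) : Nat) : Int)
      = ∑ i ∈ Finset.range j, pvInd (p i) := by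
  induction j with
  | zero => simp
  | succ j ih =>
    rw [List.range_succ, List.countP_append, Finset.sum_range_succ, ← ih]
    simp only [List.countP_cons, List.countP_nil, pvInd]
    split_ifs <;> push_cast <;> simp_all

lemma pv_loop_inv (q : Nat → Int) (m : Nat) :
    (∀ z, ((List.range m).foldl (pvStep q) (PySem.Dict.empty, 0)).1.getD z 0
        = (((List.range m).countP (fun j => decide (q j = z)) : Nat) : Int)) ∧
    ((List.range m).foldl (pvStep q) (PySem.Dict.empty, 0)).2
      = ∑ j ∈ Finset.range m,
          (pvInd (q j = 0)
            + (((List.range j).countP (fun i => decide (q i = q j)) : Nat) : Int)) := by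
  induction m with
  | zero => simp [PySem.Dict.getD_empty]
  | succ m ih =>
    obtain ⟨ih1, ih2⟩ := ih
    rw [List.range_succ, List.foldl_append, List.foldl_cons, List.foldl_nil]
    set st := (List.range m).foldl (pvStep q) (PySem.Dict.empty, 0) with hst
    have hdictD : ∀ z, (pvStep q st m).1.getD z 0
        = if z = q m then st.1.getD (q m) 0 + 1 else st.1.getD z 0 := by
      intro z
      simp only [pvStep]
      rw [PySem.Dict.getD_insert]
    have hc : (pvStep q st m).2
        = (if q m = 0 then st.2 + 1 else st.2) + st.1.getD (q m) 0 := by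
      simp only [pvStep]
      rcases h : st.1.get? (q m) with _ | v
      · simp only [h]
        rw [PySem.Dict.getD_of_get?_eq_none st.1 0 h]
        ring
      · simp only [h]
        rw [PySem.Dict.getD_of_get?_eq_some st.1 0 h]
    constructor
    · intro z
      rw [hdictD z, List.countP_append]
      by_cases hz : z = q m
      · subst hz
        rw [if_pos rfl, ih1]
        simp only [List.countP_cons, List.countP_nil, decide_eq_true_eq]
        push_cast
        simp
      · rw [if_neg hz, ih1]
        have hfalse : (decide (q m = z)) = false := decide_eq_false (fun h => hz h.symm)
        simp [List.countP_cons, hfalse]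
    · rw [hc, ih2, Finset.sum_range_succ, ih1]
      split_ifs with h0 <;> simp [pvInd, h0] <;> ring

-- count of nonempty prefixes of l whose running sum started at s hits zero
def pvCnt : List Int → Int → Int
  | [], _ => 0
  | x :: l, s => (if s + x = 0 then 1 else 0) + pvCnt l (s + x)

lemma pv_inner (l : List Int) : ∀ s c, (l.foldl solveAltStep (s, c)).2 = c + pvCnt l s := by
  induction l with
  | nil => intro s c; simp [pvCnt]
  | cons x l ih =>
    intro s c
    rw [List.foldl_cons]
    show (l.foldl solveAltStep (s + x, if s + x = 0 then c + 1 else c)).2 = _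
    rw [ih, pvCnt]
    split_ifs <;> ring

lemma pv_cnt_eq_sum (l : List Int) : ∀ s, pvCnt l s
    = ∑ k ∈ Finset.range l.length, pvInd (s + (l.take (k + 1)).sum = 0) := by
  induction l with
  | nil => intro s; simp [pvCnt]
  | cons x l ih =>
    intro s
    rw [List.length_cons, Finset.sum_range_succ']
    simp only [List.take_succ_cons, List.sum_cons, List.take_zero, List.sum_nil, add_zero]
    simp only [← add_assoc]
    rw [← ih (s + x), pvCnt]
    unfold pvInd
    rw [add_comm]

lemma pv_seg_sum (A : List Int) (i t : Nat) :
    ((A.drop i).take t).sum = pvP A (i + t) - pvP A i := by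
  unfold pvP
  rw [List.take_add, List.sum_append]
  ring

lemma pv_outer (A : List Int) : ∀ m c, (List.range m).foldl
      (fun (c : Int) (i : Nat) => ((PySem.List.slice A (some (i : Int)) none).foldl solveAltStep (0, c)).2) c
    = c + ∑ i ∈ Finset.range m, pvCnt (A.drop i) 0 := by
  intro m
  induction m with
  | zero => intro c; simp
  | succ m ih =>
    intro c
    rw [List.range_succ, List.foldl_append, List.foldl_cons, List.foldl_nil, ih,
      PySem.List.slice_from_natCast, pv_inner, Finset.sum_range_succ]
    ring

lemma pv_alt_eq (A : List Int) : solve_alt A = PySem.Int.mod (pvN A) 1000000007 := by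
  have hmain : ∑ i ∈ Finset.range A.length, pvCnt (A.drop i) 0 = pvN A := by
    set n := A.length with hn
    have hstep1 : ∑ i ∈ Finset.range n, pvCnt (A.drop i) 0
        = ∑ i ∈ Finset.range n, ∑ j ∈ Finset.range n,
            (if i ≤ j then pvInd (pvP A (j + 1) - pvP A i = 0) else 0) := by
      refine Finset.sum_congr rfl ?_
      intro i hi
      rw [pv_cnt_eq_sum, List.length_drop]
      have h1 : ∑ k ∈ Finset.range (n - i), pvInd (0 + ((A.drop i).take (k + 1)).sum = 0)
          = ∑ k ∈ Finset.range (n - i), pvInd (pvP A (i + k + 1) - pvP A i = 0) := by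
        refine Finset.sum_congr rfl ?_
        intro k _
        refine pvInd_congr ?_
        rw [zero_add, pv_seg_sum]
        have h5 : i + (k + 1) = i + k + 1 := by omega
        rw [h5]
      rw [h1]
      have h2 := Finset.sum_Ico_eq_sum_range
        (fun j => pvInd (pvP A (j + 1) - pvP A i = 0)) i n
      rw [← h2]
      have h3 : Finset.Ico i n = (Finset.range n).filter (fun j => i ≤ j) := by
        ext j; simp [Finset.mem_Ico]; omega
      rw [h3, Finset.sum_filter]
    rw [hstep1, Finset.sum_comm]
    unfold pvN
    rw [← hn]
    refine Finset.sum_congr rfl ?_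
    intro j hj
    rw [← Finset.sum_filter]
    have hjn : j < n := Finset.mem_range.mp hj
    have h4 : (Finset.range n).filter (fun i => i ≤ j) = Finset.range (j + 1) := by
      ext i; simp; omega
    rw [h4]
  unfold solve_alt
  rw [pv_outer, zero_add, hmain]

lemma pv_solve_eq (A : List Int) : solve A = PySem.Int.mod (pvN A) 1000000007 := by
  unfold solve
  by_cases h0 : A.length = 0
  · simp only [h0, if_pos rfl]
    unfold pvN
    rw [h0]
    simp
  · rw [if_neg h0]
    show PySem.Int.mod
        ((List.foldl (solveStep ((List.range A.length).foldl (solveBuildStep A)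
          (List.replicate A.length 0))) (PySem.Dict.empty, 0) (List.range A.length)).2) 1000000007
      = PySem.Int.mod (pvN A) 1000000007
    rw [solveStep_eq_pvQ, (pv_loop_inv (pvQ A) A.length).2]
    congr 1
    obtain ⟨_, hps⟩ := pv_build_inv A A.length (le_refl _)
    have hq : ∀ j, j < A.length → pvQ A j = pvP A (j + 1) := hps
    unfold pvN
    refine Finset.sum_congr rfl ?_
    intro j hj
    have hjn : j < A.length := Finset.mem_range.mp hj
    rw [Finset.sum_range_succ']
    have hcnt : (((List.range j).countP (fun i => decide (pvQ A i = pvQ A j)) : Nat) : Int)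
        = ∑ i ∈ Finset.range j, pvInd (pvP A (j + 1) - pvP A (i + 1) = 0) := by
      rw [pv_countP_range j (fun i => pvQ A i = pvQ A j)]
      refine Finset.sum_congr rfl ?_
      intro i hi
      have hin : i < A.length := by
        have := Finset.mem_range.mp hi; omega
      refine pvInd_congr ?_
      rw [hq i hin, hq j hjn, sub_eq_zero, eq_comm]
    rw [hcnt, hq j hjn]
    have hP0 : pvP A 0 = 0 := by unfold pvP; simp
    have hlast : pvInd (pvP A (j + 1) - pvP A 0 = 0) = pvInd (pvP A (j + 1) = 0) := by
      refine pvInd_congr ?_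
      rw [hP0, sub_zero]
    rw [hlast]
    ring

-- ===== VERDICT (by name: the statement is the Claim_ definition above) =====
theorem solve_spec : Claim_equal_solve := by
  intro A _
  unfold Spec_solve
  rw [pv_solve_eq, pv_alt_eq]
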